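-- pv_equiv track=rewrite | github.com/fuoyou/ai-interaction-project1 | fanya-ai-backend/utils/rag_utils.py | _trim_rag_chunks
-- ===== SOURCE A (Python) =====
-- from typing import List, Optional, Tuple
--
-- MAX_RAG_CHUNKS = 400
--
-- MAX_RAG_TOTAL_CHARS = 180000
--
-- def _trim_rag_chunks(chunks: List[str]) -> List[str]:
--     if not chunks:
--         return []
--
--     trimmed = []
--     total = 0
--     for c in chunks:
--         c = (c or "").strip()
--         if not c:
--             continue
--         if len(trimmed) >= MAX_RAG_CHUNKS:
--             break
--         if total + len(c) > MAX_RAG_TOTAL_CHARS: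
--             break
--         trimmed.append(c)
--         total += len(c)
--     return trimmed
-- ===== SOURCE B (Python) =====
-- from itertools import accumulate
-- from typing import List
--
-- MAX_RAG_CHUNKS = 400
-- MAX_RAG_TOTAL_CHARS = 180000
--
-- def _trim_rag_chunks(chunks: List[str]) -> List[str]:
--     cleaned = [s for c in chunks if (s := (c or "").strip())]
--     cums = list(accumulate(len(s) for s in cleaned))
--     cut = next((i for i, t in enumerate(cums) if t > MAX_RAG_TOTAL_CHARS), len(cleaned))
--     return cleaned[:min(cut, MAX_RAG_CHUNKS)]
-- ===== Notes on version B (the rewrite author's own statement) =====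
-- stated objective: alternative
-- what changed: Replaces A's single fused strip-skip-accumulate-break loop with a filter comprehension, a prefix-sum (itertools.accumulate) over the lengths, and a single cutoff index min(first index whose cumulative total exceeds the char limit, 400), returned as a slice.
import Mathlib
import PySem

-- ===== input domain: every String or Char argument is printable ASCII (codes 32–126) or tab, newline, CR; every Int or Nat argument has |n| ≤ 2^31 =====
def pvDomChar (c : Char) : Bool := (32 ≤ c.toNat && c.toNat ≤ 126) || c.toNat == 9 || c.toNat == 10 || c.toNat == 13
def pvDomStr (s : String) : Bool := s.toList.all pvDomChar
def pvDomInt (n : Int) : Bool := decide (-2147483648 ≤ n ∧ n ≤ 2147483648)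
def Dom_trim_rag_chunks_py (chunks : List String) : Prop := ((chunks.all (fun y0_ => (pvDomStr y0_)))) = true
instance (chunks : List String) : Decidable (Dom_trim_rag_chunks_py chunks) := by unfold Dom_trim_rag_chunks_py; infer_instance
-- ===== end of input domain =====

-- B replaces A's fused strip/skip/accumulate/break loop by a filter phase, a prefix-sum
-- over lengths, and one cutoff index (alternative decomposition, same cost).

-- ===== PORT A =====
-- the for-loop of A, carrying the `trimmed` accumulator and the running `total`
def trimLoopA : List String → List String → Int → List String
  | [], trimmed, _ => trimmed
  | c :: rest, trimmed, total =>
    let s := PySem.Str.strip c          -- (c or "").strip(): "" is falsy, and "".strip() = ""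
    if s = "" then trimLoopA rest trimmed total
    else if 400 ≤ trimmed.length then trimmed
    else if 180000 < total + PySem.Str.len s then trimmed
    else trimLoopA rest (trimmed ++ [s]) (total + PySem.Str.len s)

def trim_rag_chunks_py (chunks : List String) : List String :=
  if chunks = [] then [] else trimLoopA chunks [] 0

-- ===== PORT B =====
-- cleaned = [s for c in chunks if (s := (c or "").strip())]
def cleanB (chunks : List String) : List String :=
  chunks.filterMap (fun c =>
    let s := PySem.Str.strip c
    if s = "" then none else some s)

-- list(accumulate(...)): fold building the running sums left to right
def cumsB (lens : List Int) : List Int :=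
  (lens.foldl (fun st l => (st.1 ++ [st.2 + l], st.2 + l)) (([] : List Int), (0 : Int))).1

def trim_rag_chunks_py_alt (chunks : List String) : List String :=
  let cleaned := cleanB chunks
  let cums := cumsB (cleaned.map PySem.Str.len)
  -- next((i for i, t in enumerate(cums) if t > MAX_RAG_TOTAL_CHARS), len(cleaned)):
  -- findIdx returns cums.length (= cleaned.length) when no element qualifies
  let cut := cums.findIdx (fun t => decide (180000 < t))
  cleaned.take (min cut 400)            -- cleaned[:min(cut, 400)], nonnegative bound ⇒ take

-- ===== PRECONDITION & SPEC =====
def Spec_trim_rag_chunks_py (chunks : List String) (out : List String) : Prop := out = trim_rag_chunks_py_alt chunks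
instance (chunks : List String) (out : List String) : Decidable (Spec_trim_rag_chunks_py chunks out) := by unfold Spec_trim_rag_chunks_py; infer_instance

-- ===== CLAIM (what is proved, stated in full; the proofs are below) =====
def Claim_equal_trim_rag_chunks_py : Prop := ∀ (chunks : List String), Dom_trim_rag_chunks_py chunks → Spec_trim_rag_chunks_py chunks (trim_rag_chunks_py chunks)

-- ===== LEMMAS AND PROOFS =====

-- running sums starting from offset t (recursive characterisation of cumsB)
def cumsFrom (t : Int) : List Int → List Int
  | [] => []
  | l :: ls => (t + l) :: cumsFrom (t + l) ls

theorem cumsB_foldl_eq (lens : List Int) (acc : List Int) (t : Int) :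
    (lens.foldl (fun st l => (st.1 ++ [st.2 + l], st.2 + l)) (acc, t)).1 = acc ++ cumsFrom t lens := by
  induction lens generalizing acc t with
  | nil => simp [cumsFrom]
  | cons l ls ih => simp [List.foldl, cumsFrom, ih]

theorem cumsB_eq (lens : List Int) : cumsB lens = cumsFrom 0 lens := by
  simpa using cumsB_foldl_eq lens [] 0

-- main invariant: A's loop equals `trimmed` plus the prefix-sum cutoff of the cleaned tail
theorem trimLoopA_eq (cs : List String) (trimmed : List String) (total : Int) :
    trimLoopA cs trimmed total =
      trimmed ++ (cleanB cs).take
        (min (((cleanB cs).map PySem.Str.len |> cumsFrom total).findIdx (fun t => decide (180000 < t)))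
             (400 - trimmed.length)) := by
  induction cs generalizing trimmed total with
  | nil => simp [trimLoopA, cleanB, cumsFrom]
  | cons c rest ih =>
    simp only [trimLoopA]
    by_cases hs : PySem.Str.strip c = ""
    · rw [if_pos hs]
      have hcl : cleanB (c :: rest) = cleanB rest := by simp [cleanB, hs]
      rw [hcl]; exact ih trimmed total
    · rw [if_neg hs]
      have hcl : cleanB (c :: rest) = PySem.Str.strip c :: cleanB rest := by simp [cleanB, hs]
      rw [hcl]
      simp only [List.map_cons, cumsFrom, List.findIdx_cons]
      by_cases hcap : 400 <= trimmed.length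
      · rw [if_pos hcap]
        have h0 : 400 - trimmed.length = 0 := by omega
        simp [h0]
      · rw [if_neg hcap]
        by_cases hover : 180000 < total + PySem.Str.len (PySem.Str.strip c)
        · rw [if_pos hover, decide_eq_true hover]
          simp
        · rw [if_neg hover, decide_eq_false hover]
          rw [ih (trimmed ++ [PySem.Str.strip c]) (total + PySem.Str.len (PySem.Str.strip c))]
          have hmin : min (List.findIdx (fun t => decide (180000 < t))
                (cumsFrom (total + PySem.Str.len (PySem.Str.strip c))
                  (List.map PySem.Str.len (cleanB rest))) + 1) (400 - trimmed.length) =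
              min (List.findIdx (fun t => decide (180000 < t))
                (cumsFrom (total + PySem.Str.len (PySem.Str.strip c))
                  (List.map PySem.Str.len (cleanB rest))))
                (400 - (trimmed ++ [PySem.Str.strip c]).length) + 1 := by
            simp only [List.length_append, List.length_cons, List.length_nil]; omega
          simp only [Bool.cond_false, hmin, List.take_succ_cons, List.append_assoc,
            List.cons_append, List.nil_append]

-- B's let-bound body, with the accumulate fold replaced by its recursive form
theorem alt_eq (chunks : List String) :
    trim_rag_chunks_py_alt chunks =
      (cleanB chunks).take
        (min ((cumsFrom 0 ((cleanB chunks).map PySem.Str.len)).findIdx (fun t => decide (180000 < t))) 400) := by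
  simp only [trim_rag_chunks_py_alt, cumsB_eq]

-- ===== VERDICT (by name: the statement is the Claim_ definition above) =====
theorem trim_rag_chunks_py_spec : Claim_equal_trim_rag_chunks_py := by
  intro chunks _
  unfold Spec_trim_rag_chunks_py trim_rag_chunks_py
  by_cases h : chunks = []
  · subst h; simp [alt_eq, cleanB, cumsFrom]
  · rw [if_neg h, trimLoopA_eq, alt_eq]; simp
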